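-- pv_equiv track=rewrite | github.com/A-M-l-G-O/PracticePP2v2 | TSIS2/paint.py | hit_palette
-- ===== SOURCE A (Python) =====
-- PALETTE = [
--     (0,   0,   0),    (255, 255, 255),
--     (220, 50,  50),   (50,  180, 50),
--     (50,  50,  220),  (255, 220, 0),
--     (255, 140, 0),    (180, 0,   220),
--     (0,   200, 200),  (255, 105, 180),
--     (100, 60,  20),   (140, 140, 140),
-- ]
--
-- PAL_X   = 10
--
-- PAL_COLS = 6
--
-- def hit_palette(mx, my):
--     for i, col in enumerate(PALETTE):
--         row = i // PAL_COLS
--         ci  = i % PAL_COLS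
--         rx  = PAL_X + ci * 38
--         ry  = 8 + row * 34
--         if rx <= mx <= rx + 30 and ry <= my <= ry + 28:
--             return col
--     return None
-- ===== SOURCE B (Python) =====
-- PALETTE = [
--     (0,   0,   0),    (255, 255, 255),
--     (220, 50,  50),   (50,  180, 50),
--     (50,  50,  220),  (255, 220, 0),
--     (255, 140, 0),    (180, 0,   220),
--     (0,   200, 200),  (255, 105, 180),
--     (100, 60,  20),   (140, 140, 140),
-- ]
--
-- PAL_X   = 10
--
-- PAL_COLS = 6
--
-- def hit_palette(mx, my):
--     dx = mx - PAL_X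
--     dy = my - 8
--     if dx < 0 or dy < 0:
--         return None
--     ci  = dx // 38
--     row = dy // 34
--     if dx - ci * 38 > 30 or dy - row * 34 > 28:
--         return None
--     if ci >= PAL_COLS or row >= 2:
--         return None
--     return PALETTE[row * PAL_COLS + ci]
-- ===== Notes on version B (the rewrite author's own statement) =====
-- stated objective: faster
-- what changed: Replaces the linear scan over all 12 palette rectangles with direct O(1) cell arithmetic: compute column and row by floor division, check the click is not in the inter-cell gap, and index the palette once.
import Mathlib
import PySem

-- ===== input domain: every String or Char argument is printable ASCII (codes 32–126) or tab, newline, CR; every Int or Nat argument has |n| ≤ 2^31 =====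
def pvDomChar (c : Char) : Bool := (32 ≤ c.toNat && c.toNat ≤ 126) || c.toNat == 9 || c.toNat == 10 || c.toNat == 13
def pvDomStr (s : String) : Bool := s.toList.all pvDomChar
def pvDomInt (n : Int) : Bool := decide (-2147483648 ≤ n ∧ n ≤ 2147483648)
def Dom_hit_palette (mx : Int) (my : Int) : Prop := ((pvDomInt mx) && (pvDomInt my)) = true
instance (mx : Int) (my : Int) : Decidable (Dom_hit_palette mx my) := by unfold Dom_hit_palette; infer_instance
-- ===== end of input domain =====

-- B replaces A's linear scan over all 12 palette rectangles by O(1) cell arithmetic (floor division + gap check + one indexed lookup).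

-- ===== PORT A =====
def pvPalette : List (Int × Int × Int) :=
  [(0, 0, 0), (255, 255, 255),
   (220, 50, 50), (50, 180, 50),
   (50, 50, 220), (255, 220, 0),
   (255, 140, 0), (180, 0, 220),
   (0, 200, 200), (255, 105, 180),
   (100, 60, 20), (140, 140, 140)]

def pvPalX : Int := 10

def pvPalCols : Int := 6

-- the 'for i, col in enumerate(PALETTE)' loop with early return
def pvHitLoop (mx : Int) (my : Int) : List (Int × (Int × Int × Int)) → Option (Int × Int × Int)
  | [] => none
  | (i, col) :: rest =>
    let row := PySem.Int.floordiv i pvPalCols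
    let ci  := PySem.Int.mod i pvPalCols
    let rx  := pvPalX + ci * 38
    let ry  := 8 + row * 34
    if (rx ≤ mx ∧ mx ≤ rx + 30) ∧ (ry ≤ my ∧ my ≤ ry + 28) then some col
    else pvHitLoop mx my rest

def hit_palette (mx : Int) (my : Int) : Option (Int × Int × Int) :=
  pvHitLoop mx my (PySem.List.enumerate pvPalette)

-- ===== PORT B =====
def hit_palette_alt (mx : Int) (my : Int) : Option (Int × Int × Int) :=
  let dx := mx - pvPalX
  let dy := my - 8
  if dx < 0 ∨ dy < 0 then none
  else
    let ci  := PySem.Int.floordiv dx 38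
    let row := PySem.Int.floordiv dy 34
    if dx - ci * 38 > 30 ∨ dy - row * 34 > 28 then none
    else if pvPalCols ≤ ci ∨ 2 ≤ row then none
    else PySem.List.pyGet? pvPalette (row * pvPalCols + ci)

-- ===== PRECONDITION & SPEC =====
def Spec_hit_palette (mx : Int) (my : Int) (out : Option (Int × Int × Int)) : Prop := out = hit_palette_alt mx my
instance (mx : Int) (my : Int) (out : Option (Int × Int × Int)) : Decidable (Spec_hit_palette mx my out) := by unfold Spec_hit_palette; infer_instance

-- ===== CLAIM (what is proved, stated in full; the proofs are below) =====
def Claim_equal_hit_palette : Prop := ∀ (mx : Int) (my : Int), Dom_hit_palette mx my → Spec_hit_palette mx my (hit_palette mx my)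

-- ===== LEMMAS AND PROOFS =====

-- every hit of either program lies in the box [10,238) × [8,76); inside it, check pointwise by kernel evaluation
set_option maxRecDepth 100000 in
set_option maxHeartbeats 4000000 in
theorem pvBox : ∀ a : Nat, a < 228 → ∀ b : Nat, b < 68 →
    hit_palette (10 + (a : Int)) (8 + (b : Int)) = hit_palette_alt (10 + (a : Int)) (8 + (b : Int)) := by
  decide

-- the rectangle test of A's loop body, for one enumerated index i
def pvCond (mx my i : Int) : Prop :=
  (pvPalX + PySem.Int.mod i pvPalCols * 38 ≤ mx ∧ mx ≤ pvPalX + PySem.Int.mod i pvPalCols * 38 + 30) ∧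
  (8 + PySem.Int.floordiv i pvPalCols * 34 ≤ my ∧ my ≤ 8 + PySem.Int.floordiv i pvPalCols * 34 + 28)

theorem pvHitLoop_none (mx my : Int) (l : List (Int × (Int × Int × Int)))
    (h : ∀ p ∈ l, ¬ pvCond mx my p.1) : pvHitLoop mx my l = none := by
  induction l with
  | nil => rfl
  | cons p rest ih =>
    obtain ⟨i, col⟩ := p
    rw [pvHitLoop]
    rw [if_neg (by exact h (i, col) (List.mem_cons_self ..))]
    exact ih fun q hq => h q (List.mem_cons_of_mem _ hq)

theorem pvAnone (mx my : Int) (h : mx < 10 ∨ 238 ≤ mx ∨ my < 8 ∨ 76 ≤ my) :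
    hit_palette mx my = none := by
  rw [hit_palette]
  apply pvHitLoop_none
  intro p hp
  have e : PySem.List.enumerate pvPalette = [((0:Int),((0:Int),(0:Int),(0:Int))),(1,(255,255,255)),(2,(220,50,50)),(3,(50,180,50)),(4,(50,50,220)),(5,(255,220,0)),(6,(255,140,0)),(7,(180,0,220)),(8,(0,200,200)),(9,(255,105,180)),(10,(100,60,20)),(11,(140,140,140))] := by decide
  rw [e] at hp
  fin_cases hp <;>
    simp only [pvCond, pvPalX, pvPalCols,
      show PySem.Int.floordiv 0 6 = 0 from by decide, show PySem.Int.mod 0 6 = 0 from by decide,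
      show PySem.Int.floordiv 1 6 = 0 from by decide, show PySem.Int.mod 1 6 = 1 from by decide,
      show PySem.Int.floordiv 2 6 = 0 from by decide, show PySem.Int.mod 2 6 = 2 from by decide,
      show PySem.Int.floordiv 3 6 = 0 from by decide, show PySem.Int.mod 3 6 = 3 from by decide,
      show PySem.Int.floordiv 4 6 = 0 from by decide, show PySem.Int.mod 4 6 = 4 from by decide,
      show PySem.Int.floordiv 5 6 = 0 from by decide, show PySem.Int.mod 5 6 = 5 from by decide,
      show PySem.Int.floordiv 6 6 = 1 from by decide, show PySem.Int.mod 6 6 = 0 from by decide,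
      show PySem.Int.floordiv 7 6 = 1 from by decide, show PySem.Int.mod 7 6 = 1 from by decide,
      show PySem.Int.floordiv 8 6 = 1 from by decide, show PySem.Int.mod 8 6 = 2 from by decide,
      show PySem.Int.floordiv 9 6 = 1 from by decide, show PySem.Int.mod 9 6 = 3 from by decide,
      show PySem.Int.floordiv 10 6 = 1 from by decide, show PySem.Int.mod 10 6 = 4 from by decide,
      show PySem.Int.floordiv 11 6 = 1 from by decide, show PySem.Int.mod 11 6 = 5 from by decide] <;>
    omega

theorem pvBnone (mx my : Int) (h : mx < 10 ∨ 238 ≤ mx ∨ my < 8 ∨ 76 ≤ my) :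
    hit_palette_alt mx my = none := by
  rw [hit_palette_alt]
  simp only [pvPalX, pvPalCols]
  split_ifs with h1 h2 h3 <;> try rfl
  exfalso
  rcases h with h | h | h | h
  · omega
  · have : (6:Int) ≤ PySem.Int.floordiv (mx - 10) 38 :=
      (PySem.Int.le_floordiv_iff_mul_le (by norm_num)).mpr (by omega)
    omega
  · omega
  · have : (2:Int) ≤ PySem.Int.floordiv (my - 8) 34 :=
      (PySem.Int.le_floordiv_iff_mul_le (by norm_num)).mpr (by omega)
    omega

-- ===== VERDICT (by name: the statement is the Claim_ definition above) =====
theorem hit_palette_spec : Claim_equal_hit_palette := by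
  intro mx my _
  unfold Spec_hit_palette
  by_cases h : 10 ≤ mx ∧ mx < 238 ∧ 8 ≤ my ∧ my < 76
  · have e1 : mx = 10 + ((mx - 10).toNat : Int) := by omega
    have e2 : my = 8 + ((my - 8).toNat : Int) := by omega
    rw [e1, e2]
    exact pvBox _ (by omega) _ (by omega)
  · rw [pvAnone mx my (by omega), pvBnone mx my (by omega)]
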